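-- pv_equiv track=rewrite | github.com/Franciscocpierna/python_rpa_projetos | tk_vagas_estacionamento/exec_vagas_estacionamento1e2.py | selecionar_vaga_automaticamente
-- ===== SOURCE A (Python) =====
-- def selecionar_vaga_automaticamente(vagas):
--
--     # Cria um dicionário vazio chamado num_vagas_desocupadas. Este dicionário será
--     # usado para armazenar o número de vagas desocupadas em cada bloco de estacionamento.
--     # A chave será o nome do bloco e o valor será o número de vagas desocupadas.
--     num_vagas_desocupadas = {}
--
--     # Inicia um loop que percorre cada par chave-valor no dicionário 'vagas'.
--     # 'bloco' representa a chave (o nome do bloco de estacionamento) e 'vagas_em_bloco'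
--     # é o valor associado (uma lista de vagas no bloco).
--     for bloco, vagas_em_bloco in vagas.items():
--
--         # Conta o número de vagas desocupadas em cada bloco. Isso é feito utilizando o método
--         # .count('-'), que retorna quantas vezes o caractere '-' (indicando uma vaga desocupada)
--         # aparece na lista de vagas do bloco. O resultado é armazenado no dicionário
--         # num_vagas_desocupadas, com o nome do bloco como chave.
--         num_vagas_desocupadas[bloco] = vagas_em_bloco.count('-')
--
--     # Ordena os blocos de estacionamento com base no número de vagas desocupadas, em ordem
--     # decrescente. Isso é feito utilizando a função sorted(), que retorna uma nova lista.
--     # num_vagas_desocupadas é o dicionário que queremos ordenar.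
--     # key=num_vagas_desocupadas.get é uma função que é chamada para cada elemento da lista
--     # de blocos, retornando o número de vagas desocupadas para aquele bloco.
--     # reverse=True especifica que a lista deve ser ordenada em ordem decrescente, ou seja,
--     # os blocos com mais vagas desocupadas virão primeiro.
--     blocos_ordenados = sorted(num_vagas_desocupadas, key=num_vagas_desocupadas.get, reverse=True)
--
--     # Esta parte do código é responsável por tentar encontrar uma vaga desocupada
--     # dentro dos blocos de estacionamento, seguindo a ordem de prioridade estabelecida
--     # (blocos com mais vagas desocupadas primeiro).
--
--     # Inicia um loop que percorre cada bloco na lista 'blocos_ordenados'.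
--     # Lembre-se de que 'blocos_ordenados' contém os nomes dos blocos ordenados
--     # de acordo com o número de vagas desocupadas, do maior para o menor.
--     for bloco in blocos_ordenados:
--
--         # Inicia um segundo loop que itera sobre cada vaga no bloco atual.
--         # A função enumerate() é usada aqui para obter tanto o índice (i) quanto
--         # o valor (vaga) para cada elemento na lista de vagas do bloco.
--         # 'i' é o índice da vaga na lista, e 'vaga' é o estado atual da vaga
--         # (ocupada ou desocupada).
--         for i, vaga in enumerate(vagas[bloco]):
--
--             # Verifica se a vaga atual está desocupada. Uma vaga desocupada é
--             # representada pelo caractere '-'.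
--             if vaga == '-':
--
--                 # Se a vaga está desocupada, a função ocupa essa vaga. Isso é feito
--                 # substituindo '-' por 'X' no índice correspondente da lista de vagas
--                 # para o bloco. 'X' é usado para indicar que a vaga agora está ocupada.
--                 vagas[bloco][i] = 'X'
--
--                 # Após ocupar uma vaga, a função retorna True. Isso indica que uma vaga foi
--                 # selecionada e ocupada com sucesso.
--                 return True
--
--     # Se o código chegar a este ponto, significa que todas as vagas em todos os blocos
--     # estão ocupadas (nenhuma vaga desocupada foi encontrada em nenhum dos blocos).
--     # Portanto, a função retorna False, indicando que não foi possível selecionar uma vaga.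
--     return False
-- ===== SOURCE B (Python) =====
-- def selecionar_vaga_automaticamente(vagas):
--     # Same return value as A; also performs the same in-place occupation
--     # (A and B always occupy the first '-' of the first block with the most free spots).
--     if not vagas:
--         return False
--     melhor = max(vagas, key=lambda bloco: vagas[bloco].count('-'))
--     bloco = vagas[melhor]
--     if '-' not in bloco:
--         return False
--     bloco[bloco.index('-')] = 'X'
--     return True
-- ===== Notes on version B (the rewrite author's own statement) =====
-- stated objective: simpler
-- what changed: Replaces building a count dict, sorting all blocks by free-spot count and rescanning every block with a single max-selection of the best block followed by one membership test and one index assignment on that block alone.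
import Mathlib
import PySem

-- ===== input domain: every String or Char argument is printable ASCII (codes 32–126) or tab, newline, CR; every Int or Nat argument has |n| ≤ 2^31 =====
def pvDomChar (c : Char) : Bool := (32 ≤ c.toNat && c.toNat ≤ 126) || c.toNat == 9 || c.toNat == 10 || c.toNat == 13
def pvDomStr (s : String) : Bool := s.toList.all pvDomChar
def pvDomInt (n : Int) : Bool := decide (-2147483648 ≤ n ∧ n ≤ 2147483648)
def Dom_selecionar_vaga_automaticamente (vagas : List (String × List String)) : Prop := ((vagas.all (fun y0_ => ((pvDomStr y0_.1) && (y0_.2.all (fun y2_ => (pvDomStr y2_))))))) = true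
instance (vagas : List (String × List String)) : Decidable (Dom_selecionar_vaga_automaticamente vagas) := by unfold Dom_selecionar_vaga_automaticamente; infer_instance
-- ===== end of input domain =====

-- B replaces A's count-dict + sort + rescan of every block by one max-selection of the best
-- block and a single membership test on it (objective: simpler). Both Pythons occupy the same
-- spot in place; the equivalence proved here is about the RETURN value.

-- ===== PORT A =====
-- num_vagas_desocupadas: dict of '-'-counts, built by the first for-loop
def pvContaVagas (vagas : List (String × List String)) : PySem.Dict String Int :=
  vagas.foldl (fun d p => d.insert p.1 ((p.2.count "-" : Int))) PySem.Dict.empty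

-- inner loop: for i, vaga in enumerate(vagas[bloco]): if vaga == '-': … return True
-- (the in-place write vagas[bloco][i] = 'X' precedes an immediate return, so it cannot
-- affect the returned value; the port tracks the return value)
def pvInnerA (pares : List (Int × String)) : Bool :=
  match pares with
  | [] => false
  | (_, vaga) :: resto => if vaga == "-" then true else pvInnerA resto

-- outer loop: for bloco in blocos_ordenados (vagas[bloco] is a dict lookup: first match)
def pvOuterA (vagas : List (String × List String)) : List String → Bool
  | [] => false
  | bloco :: resto =>
    if pvInnerA (PySem.List.enumerate ((PySem.Dict.mk vagas).getD bloco [])) then true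
    else pvOuterA vagas resto

def selecionar_vaga_automaticamente (vagas : List (String × List String)) : Bool :=
  let num := pvContaVagas vagas
  let blocos_ordenados := PySem.List.sorted num.keys (fun b => num.getD b 0) true
  pvOuterA vagas blocos_ordenados

-- ===== PORT B =====
def selecionar_vaga_automaticamente_alt (vagas : List (String × List String)) : Bool :=
  match vagas with
  | [] => false
  | _ :: _ =>
    match PySem.List.max? (vagas.map Prod.fst)
        (fun b => (((PySem.Dict.mk vagas).getD b []).count "-" : Int)) with
    | none => false  -- unreachable totality guard: the key list is nonempty
    | some melhor => ((PySem.Dict.mk vagas).getD melhor []).contains "-"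

-- ===== PRECONDITION & SPEC =====
def Spec_selecionar_vaga_automaticamente (vagas : List (String × List String)) (out : Bool) : Prop := out = selecionar_vaga_automaticamente_alt vagas
instance (vagas : List (String × List String)) (out : Bool) : Decidable (Spec_selecionar_vaga_automaticamente vagas out) := by unfold Spec_selecionar_vaga_automaticamente; infer_instance

-- ===== CLAIM (what is proved, stated in full; the proofs are below) =====
def Claim_equal_selecionar_vaga_automaticamente : Prop := ∀ (vagas : List (String × List String)), Dom_selecionar_vaga_automaticamente vagas → Spec_selecionar_vaga_automaticamente vagas (selecionar_vaga_automaticamente vagas)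

-- ===== LEMMAS AND PROOFS =====

-- A's inner loop over enumerate(l) just decides whether '-' occurs in l
theorem pvInnerA_eq (l : List String) (s : Int) :
    pvInnerA (PySem.List.enumerate l s) = l.contains "-" := by
  induction l generalizing s with
  | nil => simp [PySem.List.enumerate_nil, pvInnerA]
  | cons x t ih =>
    rw [PySem.List.enumerate_cons]
    simp only [pvInnerA, List.contains_cons]
    by_cases h : x = "-"
    · simp [h]
    · simp [h, ih, Ne.symm h]

-- A's outer loop is an 'any' over the block list
theorem pvOuterA_eq (vagas : List (String × List String)) (bs : List String) :
    pvOuterA vagas bs = bs.any (fun b => ((PySem.Dict.mk vagas).getD b []).contains "-") := by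
  induction bs with
  | nil => simp [pvOuterA]
  | cons b t ih =>
    simp [pvOuterA, pvInnerA_eq, ih]


-- membership in A's sorted block list = membership in the key column of vagas
theorem mem_blocos (vagas : List (String × List String)) (b : String) :
    b ∈ PySem.List.sorted (pvContaVagas vagas).keys
        (fun b => (pvContaVagas vagas).getD b 0) true
      ↔ b ∈ vagas.map Prod.fst := by
  rw [PySem.List.mem_sorted]
  unfold pvContaVagas
  rw [PySem.Dict.keys_foldl_insert_key vagas Prod.fst
        (fun _ p => ((p.2.count "-" : Int))) PySem.Dict.empty]
  simp [PySem.Dict.keys_empty, PySem.Set.update, ← PySem.Set.ofList_eq_foldl,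
    PySem.Set.mem_ofList]

-- ===== VERDICT (by name: the statement is the Claim_ definition above) =====
theorem selecionar_vaga_automaticamente_spec : Claim_equal_selecionar_vaga_automaticamente := by
  intro vagas _
  unfold Spec_selecionar_vaga_automaticamente
  show selecionar_vaga_automaticamente vagas = selecionar_vaga_automaticamente_alt vagas
  unfold selecionar_vaga_automaticamente
  rw [pvOuterA_eq]
  match hv : vagas with
  | [] => decide
  | p :: rest =>
    simp only [selecionar_vaga_automaticamente_alt]
    have hne : (p :: rest).map Prod.fst ≠ [] := by simp
    rcases hm : PySem.List.max? ((p :: rest).map Prod.fst)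
        (fun b => (((PySem.Dict.mk (p :: rest)).getD b []).count "-" : Int)) with _ | melhor
    · exact absurd ((PySem.List.max?_eq_none_iff _ _).mp hm) hne
    · -- both sides decide the same existential
      have hmem := PySem.List.max?_mem hm
      have hmax := PySem.List.max?_isMax hm
      rw [Bool.eq_iff_iff, List.any_eq_true]
      constructor
      · rintro ⟨b, hb, hc⟩
        have hb' : b ∈ (p :: rest).map Prod.fst := (mem_blocos _ _).mp hb
        have h1 : 0 < ((PySem.Dict.mk (p :: rest)).getD b []).count "-" :=
          List.count_pos_iff.mpr (by simpa using hc)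
        have h2 := hmax b hb'
        have : 0 < ((PySem.Dict.mk (p :: rest)).getD melhor []).count "-" := by omega
        simpa using List.count_pos_iff.mp this
      · intro hc
        exact ⟨melhor, (mem_blocos _ _).mpr hmem, hc⟩
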